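-- pv_equiv track=rewrite | github.com/sungin95/TIL | python/코드테스트(연습)/백준/23y01m/9935.py | str__function
-- ===== SOURCE A (Python) =====
-- def str__function(str_, boom):
--     str_2 = list()
--     for i in range(len(str_)):
--         str_2.append(str_[i])
--         # "".join(str_2[-len(boom) :]) 신기한 구조
--         if "".join(str_2[-len(boom) :]) == boom:
--             for _ in range(len(boom)):
--                 str_2.pop()
--     return str_2
-- ===== SOURCE B (Python) =====
-- def str__function(str_, boom):
--     # Repeated leftmost-occurrence deletion by find/splice on the string itself.
--     # The stack scan of A removes exactly the occurrence with the smallest end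
--     # index of the current string, i.e. the leftmost occurrence, so iterating
--     # "delete the leftmost occurrence" yields the same final string; after a
--     # deletion at i, a new occurrence can only start at index >= i - len(boom) + 1.
--     m = len(boom)
--     if m == 0:
--         return list(str_)
--     s = str_
--     i = s.find(boom)
--     while i != -1:
--         s = s[:i] + s[i + m:]
--         i = s.find(boom, max(i - m + 1, 0))
--     return list(s)
-- ===== Notes on version B (the rewrite author's own statement) =====
-- stated objective: faster
-- what changed: A simulates a character stack, re-joining the boom-length tail into a fresh string after every single push and popping char by char on a match; B never builds a stack: it repeatedly finds the leftmost occurrence of boom with str.find and splices it out of the string in one slice, resuming the search at max(i - len(boom) + 1, 0) since a new occurrence can only straddle the splice point.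
import Mathlib
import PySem

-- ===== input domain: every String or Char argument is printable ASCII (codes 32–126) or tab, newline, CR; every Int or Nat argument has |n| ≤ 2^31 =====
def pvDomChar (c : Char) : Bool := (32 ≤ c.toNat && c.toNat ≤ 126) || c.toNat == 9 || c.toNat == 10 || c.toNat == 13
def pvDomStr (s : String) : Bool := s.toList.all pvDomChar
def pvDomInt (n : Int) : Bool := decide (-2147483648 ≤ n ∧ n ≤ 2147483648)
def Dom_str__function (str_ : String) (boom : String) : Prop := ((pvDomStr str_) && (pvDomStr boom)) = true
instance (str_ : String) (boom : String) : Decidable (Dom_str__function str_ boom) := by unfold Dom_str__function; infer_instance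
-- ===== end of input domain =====

-- B replaces A's char-stack (push each char, re-join the boom-length tail, pop on match) by
-- repeated deletion of the LEFTMOST occurrence via find/splice on the string itself; the two
-- agree because A's pops remove exactly the leftmost occurrence of the current string.

-- ===== PORT A =====
-- the one-character string str_[i] / a stack element
def pvSing (c : Char) : String := String.ofList [c]

-- `for _ in range(len(boom)): str_2.pop()` — pop() never sees an empty list here
-- (the matched tail has len(boom) elements), so each pop is exactly dropLast
def pvPopN (m : Nat) (s : List String) : List String :=
  (List.range m).foldl (fun t _ => t.dropLast) s

-- one iteration of A's loop body (append, then the join-of-tail test and the pop loop)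
def pvStepA (boom : String) (s2 : List String) (c : Char) : List String :=
  let s2 := s2 ++ [pvSing c]
  if PySem.Str.join "" (PySem.List.slice s2 (some (-(boom.toList.length : Int))) none) = boom
  then pvPopN boom.toList.length s2
  else s2

def str__function (str_ : String) (boom : String) : List String :=
  str_.toList.foldl (pvStepA boom) []

-- ===== PORT B =====
-- s.find(boom, start): index of the leftmost occurrence of boom at index >= start, none = -1
def pvOccB (bl s : List Char) (i : Nat) : Bool := (s.drop i).take bl.length == bl
def pvFind (bl s : List Char) (start : Nat) : Option Nat :=
  (List.range' start (s.length + 1 - start)).find? (pvOccB bl s)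

-- the while loop: find the leftmost occurrence, splice it out (s[:i] + s[i+m:]), resume the
-- search at max(i - m + 1, 0); fuel (each deletion removes >= 1 char) only makes it total
def pvLoop (bl : List Char) : Nat → List Char → Nat → List Char
  | 0, s, _ => s
  | fuel + 1, s, start =>
    match pvFind bl s start with
    | none => s
    | some i => pvLoop bl fuel (s.take i ++ s.drop (i + bl.length)) (i + 1 - bl.length)

def str__function_alt (str_ : String) (boom : String) : List String :=
  let bl := boom.toList
  if bl.length = 0 then str_.toList.map pvSing
  else (pvLoop bl (str_.toList.length + 1) str_.toList 0).map pvSing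

-- ===== PRECONDITION & SPEC =====
def Spec_str__function (str_ : String) (boom : String) (out : List String) : Prop := out = str__function_alt str_ boom
instance (str_ : String) (boom : String) (out : List String) : Decidable (Spec_str__function str_ boom out) := by unfold Spec_str__function; infer_instance

-- ===== CLAIM (what is proved, stated in full; the proofs are below) =====
def Claim_equal_str__function : Prop := ∀ (str_ : String) (boom : String), Dom_str__function str_ boom → Spec_str__function str_ boom (str__function str_ boom)

-- ===== LEMMAS AND PROOFS =====

-- proof-side view of A's loop body on the underlying characters
def pvCharStep (bl st : List Char) (c : Char) : List Char :=
  let st' := st ++ [c]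
  if st'.drop (st'.length - bl.length) = bl then st'.take (st'.length - bl.length) else st'

-- "an occurrence of bl starts at index i of s" (what pvOccB decides)
def pvOcc (bl s : List Char) (i : Nat) : Prop := (s.drop i).take bl.length = bl

lemma pvOccB_iff (bl s : List Char) (i : Nat) : pvOccB bl s i = true ↔ pvOcc bl s i := by
  simp [pvOccB, pvOcc]

lemma pvSing_toList (c : Char) : (pvSing c).toList = [c] := by simp [pvSing]

-- popping m times is taking all but the last m elements
lemma pvPopN_eq_take (m : Nat) (s : List String) : pvPopN m s = s.take (s.length - m) := by
  induction m with
  | zero => simp [pvPopN]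
  | succ k ih =>
    have : pvPopN (k + 1) s = (pvPopN k s).dropLast := by
      simp [pvPopN, List.range_succ]
    rw [this, ih, List.dropLast_eq_take, List.take_take, List.length_take]
    congr 1
    omega

-- joining singleton strings with "" recovers the underlying characters
lemma pvJoin_map_sing (l : List Char) : (PySem.Str.join "" (l.map pvSing)).toList = l := by
  rw [PySem.Str.toList_join]
  have : (l.map pvSing).map String.toList = l.map (fun c => [c]) := by
    simp [pvSing_toList]
  rw [this]
  simpa using PySem.Chars.join_nil_singletons l

-- one step of A on a stack of singleton strings is pvCharStep on the characters
lemma pvStepA_char (boom : String) (ds : List Char) (c : Char) :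
    pvStepA boom (ds.map pvSing) c = (pvCharStep boom.toList ds c).map pvSing := by
  set bl := boom.toList with hbl
  set m := bl.length with hm
  have hstack : ds.map pvSing ++ [pvSing c] = (ds ++ [c]).map pvSing := by simp
  set ds' := ds ++ [c] with hds'
  set n := ds'.length with hn
  by_cases hm0 : m = 0
  · -- boom = "": A's slice [-0:] is the whole stack, whose join is nonempty, so no pop;
    -- pvCharStep's test `drop n = []` is true and `take n` is the identity
    have hbe : boom = "" := by
      have : bl = [] := List.length_eq_zero_iff.mp (hm ▸ hm0)
      have := congrArg String.ofList this
      simpa [hbl] using this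
    have hne : PySem.Str.join "" (ds'.map pvSing) ≠ boom := by
      intro h
      have := congrArg String.toList h
      rw [pvJoin_map_sing] at this
      simp [hbe, hds'] at this
    have hslice : PySem.List.slice (ds'.map pvSing) (some (-(m : Int))) none = ds'.map pvSing := by
      rw [hm0]
      simp [PySem.List.slice]
    simp only [pvStepA, hstack, ← hbl, ← hm, hslice]
    rw [if_neg hne]
    simp only [pvCharStep, ← hds', ← hn]
    rw [if_pos (by simp [List.length_eq_zero_iff.mp (hm ▸ hm0), hn])]
    simp
    omega
  · have hm1 : 1 ≤ m := by omega
    have hslice : PySem.List.slice (ds'.map pvSing) (some (-(m : Int))) none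
        = (ds'.drop (n - m)).map pvSing := by
      rw [PySem.List.slice_from_neg_natCast _ m hm1]
      simp [hn]
    have hcond : (PySem.Str.join "" (PySem.List.slice (ds'.map pvSing) (some (-(m : Int))) none) = boom)
        ↔ ds'.drop (n - m) = bl := by
      rw [hslice, ← String.toList_inj, pvJoin_map_sing, hbl]
    by_cases hc : ds'.drop (n - m) = bl
    · simp only [pvStepA, hstack, ← hbl, ← hm]
      rw [if_pos (hcond.mpr hc), pvPopN_eq_take]
      simp only [pvCharStep, ← hds', ← hn]
      rw [if_pos hc]
      simp [hn, List.map_take, ← hm]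
    · simp only [pvStepA, hstack, ← hbl, ← hm]
      rw [if_neg (fun h => hc (hcond.mp h))]
      simp only [pvCharStep, ← hds', ← hn]
      rw [if_neg hc]

lemma pvFoldA_char (boom : String) (cs ds : List Char) :
    cs.foldl (pvStepA boom) (ds.map pvSing) = (cs.foldl (pvCharStep boom.toList) ds).map pvSing := by
  induction cs generalizing ds with
  | nil => rfl
  | cons c cs ih => simp only [List.foldl_cons, pvStepA_char, ih]

lemma pvCharStep_nil (st : List Char) (c : Char) : pvCharStep [] st c = st ++ [c] := by
  simp [pvCharStep]

lemma pvFold_nil (cs ds : List Char) : cs.foldl (pvCharStep []) ds = ds ++ cs := by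
  induction cs generalizing ds with
  | nil => simp
  | cons c cs ih => simp [pvCharStep_nil, ih]

-- an occurrence has room: i + |bl| ≤ |s|  (for nonempty bl)
lemma pvOcc_length {bl s : List Char} {i : Nat} (hbl : bl ≠ []) (h : pvOcc bl s i) :
    i + bl.length ≤ s.length := by
  have hlen := congrArg List.length h
  simp at hlen
  have : 0 < bl.length := List.length_pos_iff.mpr hbl
  omega

-- an occurrence inside a prefix is an occurrence
lemma pvOcc_of_take {bl s : List Char} {t j : Nat} (hbl : bl ≠ []) (h : pvOcc bl (s.take t) j) :
    pvOcc bl s j := by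
  have hle : j + bl.length ≤ t := by
    have := pvOcc_length hbl h
    simp [List.length_take] at this
    omega
  unfold pvOcc at h ⊢
  rw [List.drop_take, List.take_take, min_eq_left (by omega)] at h
  exact h

-- an occurrence lying inside the left part of an append is unaffected by the right part
lemma pvOcc_append_iff {bl st : List Char} (cs : List Char) {j : Nat}
    (hj : j + bl.length ≤ st.length) :
    pvOcc bl (st ++ cs) j ↔ pvOcc bl st j := by
  unfold pvOcc
  rw [List.drop_append, List.take_append]
  have h1 : j - st.length = 0 := by omega
  have h2 : bl.length - (st.drop j).length = 0 := by
    simp [List.length_drop]; omega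
  rw [h1, h2]
  simp

-- the suffix test of pvCharStep is exactly the occurrence at index |s| - |bl|
lemma pvOcc_at_end (bl s : List Char) :
    pvOcc bl s (s.length - bl.length) ↔ s.drop (s.length - bl.length) = bl := by
  unfold pvOcc
  rw [List.take_of_length_le (by simp [List.length_drop]; omega)]

-- find? over range' returns the least index satisfying p
lemma pvFind?_range'_some (p : Nat → Bool) (i : Nat) :
    ∀ (n a : Nat), a ≤ i → i < a + n → p i = true → (∀ j, a ≤ j → j < i → p j = false) →
    (List.range' a n).find? p = some i := by
  intro n
  induction n with
  | zero => intro a _ h; omega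
  | succ k ih =>
    intro a hai hin hp hmin
    rw [List.range'_succ, List.find?_cons]
    by_cases hae : a = i
    · subst hae; simp [hp]
    · have hpa : p a = false := hmin a le_rfl (by omega)
      simp only [hpa]
      exact ih (a + 1) (by omega) (by omega) hp (fun j h1 h2 => hmin j (by omega) h2)

lemma pvFind_none {bl s : List Char} (start : Nat) (hfree : ∀ j, ¬ pvOcc bl s j) :
    pvFind bl s start = none := by
  apply List.find?_eq_none.mpr
  intro i _
  simp only [Bool.not_eq_true]
  by_contra h
  exact hfree i (pvOccB_iff bl s i |>.mp (by simpa using h))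

lemma pvFind_some {bl s : List Char} {start i : Nat} (hbl : bl ≠ [])
    (hocc : pvOcc bl s i) (hmin : ∀ j, j < i → ¬ pvOcc bl s j) (hstart : start ≤ i) :
    pvFind bl s start = some i := by
  apply pvFind?_range'_some
  · exact hstart
  · have := pvOcc_length hbl hocc
    have : 0 < bl.length := List.length_pos_iff.mpr hbl
    omega
  · exact (pvOccB_iff bl s i).mpr hocc
  · intro j _ hji
    simp only [Bool.eq_false_iff, ne_eq]
    intro h
    exact hmin j hji ((pvOccB_iff bl s j).mp h)

-- MAIN INVARIANT: from a boom-free stack st, A's remaining fold over cs computes exactly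
-- B's repeated leftmost deletion on st ++ cs (resuming the search at `start` is sound
-- because no occurrence starts before `start`)
lemma pvKey {bl : List Char} (hbl : bl ≠ []) :
    ∀ (cs st : List Char) (start fuel : Nat),
      (∀ j, ¬ pvOcc bl st j) → (∀ j, j < start → ¬ pvOcc bl (st ++ cs) j) →
      cs.length + 1 ≤ fuel →
      cs.foldl (pvCharStep bl) st = pvLoop bl fuel (st ++ cs) start := by
  intro cs
  induction cs with
  | nil =>
    intro st start fuel hfree _ hfuel
    obtain ⟨f, rfl⟩ : ∃ f, fuel = f + 1 := ⟨fuel - 1, by omega⟩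
    simp [pvLoop, pvFind_none start hfree]
  | cons c cs' ih =>
    intro st start fuel hfree hstart hfuel
    have hsplit : st ++ c :: cs' = (st ++ [c]) ++ cs' := by simp
    set st' := st ++ [c] with hst'
    set n := st'.length with hn
    have hnL : n = st.length + 1 := by simp [hst', hn]
    -- any occurrence in st' must be the one ending at the last character
    have hocc_st' : ∀ j, pvOcc bl st' j → j = n - bl.length := by
      intro j hj
      have hle := pvOcc_length hbl hj
      by_contra hne
      have hjL : j + bl.length ≤ st.length := by
        rw [← hn] at hle; omega
      exact hfree j ((pvOcc_append_iff [c] hjL).mp (hst' ▸ hj))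
    by_cases hmatch : st'.drop (n - bl.length) = bl
    · -- A pops: the suffix occurrence is the leftmost occurrence of st' ++ cs'
      have hmn : bl.length ≤ n := by
        have := congrArg List.length hmatch
        simp [hn] at this
        have : 0 < bl.length := List.length_pos_iff.mpr hbl
        omega
      have hmpos : 0 < bl.length := List.length_pos_iff.mpr hbl
      set i₀ := n - bl.length with hi₀
      have hocc0 : pvOcc bl (st' ++ cs') i₀ :=
        (pvOcc_append_iff cs' (by omega)).mpr ((pvOcc_at_end bl st').mpr hmatch)
      have hmin : ∀ j, j < i₀ → ¬ pvOcc bl (st' ++ cs') j := by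
        intro j hji hj
        have hle := pvOcc_length hbl hj
        by_cases hin : j + bl.length ≤ n
        · exact absurd (hocc_st' j ((pvOcc_append_iff cs' hin).mp hj)) (by omega)
        · have : 0 < bl.length := List.length_pos_iff.mpr hbl
          omega
      have hstart0 : start ≤ i₀ := by
        by_contra h
        exact hstart i₀ (by omega) (hsplit ▸ hocc0)
      obtain ⟨f, rfl⟩ : ∃ f, fuel = f + 1 := ⟨fuel - 1, by omega⟩
      have hfind : pvFind bl (st' ++ cs') start = some i₀ := pvFind_some hbl hocc0 hmin hstart0
      -- splicing out the occurrence leaves st'.take i₀ ++ cs'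
      have htake : (st' ++ cs').take i₀ = st'.take i₀ := by
        rw [List.take_append, Nat.sub_eq_zero_of_le (by omega)]
        simp
      have hdrop : (st' ++ cs').drop (i₀ + bl.length) = cs' := by
        have : i₀ + bl.length = st'.length := by omega
        rw [this, List.drop_left]
      -- the new stack is boom-free
      have hfree' : ∀ j, ¬ pvOcc bl (st'.take i₀) j := by
        intro j hj
        have hle := pvOcc_length hbl hj
        have hji : j + bl.length ≤ i₀ := by
          simpa [List.length_take, min_eq_left (show i₀ ≤ n by omega), ← hn] using hle
        have := hocc_st' j (pvOcc_of_take hbl hj)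
        omega
      have hstart' : ∀ j, j < i₀ + 1 - bl.length → ¬ pvOcc bl (st'.take i₀ ++ cs') j := by
        intro j hji hj
        have hle := pvOcc_length hbl hj
        have hlen : (st'.take i₀).length = i₀ := by
          simp [List.length_take]; omega
        have hjin : j + bl.length ≤ (st'.take i₀).length := by
          rw [hlen]
          have : 0 < bl.length := List.length_pos_iff.mpr hbl
          omega
        exact hfree' j ((pvOcc_append_iff cs' hjin).mp hj)
      calc (c :: cs').foldl (pvCharStep bl) st
          = cs'.foldl (pvCharStep bl) (st'.take i₀) := by
            simp only [List.foldl_cons, pvCharStep, ← hst', ← hn, ← hi₀]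
            rw [if_pos hmatch]
        _ = pvLoop bl f (st'.take i₀ ++ cs') (i₀ + 1 - bl.length) :=
            ih (st'.take i₀) (i₀ + 1 - bl.length) f hfree' hstart' (by simp at hfuel; omega)
        _ = pvLoop bl (f + 1) (st ++ c :: cs') start := by
            rw [hsplit]
            conv_rhs => rw [pvLoop]
            rw [hfind]
            simp only [htake, hdrop]
    · -- no pop: st' stays boom-free and the string is unchanged
      have hfree' : ∀ j, ¬ pvOcc bl st' j := by
        intro j hj
        exact hmatch ((pvOcc_at_end bl st').mp ((hocc_st' j hj) ▸ hj))
      have hstart' : ∀ j, j < start → ¬ pvOcc bl (st' ++ cs') j := by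
        intro j hji
        rw [← hsplit]
        exact hstart j hji
      calc (c :: cs').foldl (pvCharStep bl) st
          = cs'.foldl (pvCharStep bl) st' := by
            simp only [List.foldl_cons, pvCharStep, ← hst', ← hn]
            rw [if_neg hmatch]
        _ = pvLoop bl fuel (st' ++ cs') start :=
            ih st' start fuel hfree' hstart' (by simp at hfuel ⊢; omega)
        _ = pvLoop bl fuel (st ++ c :: cs') start := by rw [hsplit]

-- ===== VERDICT (by name: the statement is the Claim_ definition above) =====
theorem str__function_spec : Claim_equal_str__function := by
  intro str_ boom _
  unfold Spec_str__function str__function str__function_alt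
  have hA : str_.toList.foldl (pvStepA boom) []
      = (str_.toList.foldl (pvCharStep boom.toList) []).map pvSing := by
    simpa using pvFoldA_char boom str_.toList []
  rw [hA]
  by_cases hm0 : boom.toList.length = 0
  · have hbl : boom.toList = [] := List.length_eq_zero_iff.mp hm0
    simp [hbl, pvFold_nil]
  · have hbl : boom.toList ≠ [] := fun h => hm0 (by simp [h])
    simp only [if_neg hm0]
    congr 1
    have hfree : ∀ j, ¬ pvOcc boom.toList ([] : List Char) j := by
      intro j hj
      unfold pvOcc at hj
      simp at hj
      exact hbl (by simp [← hj])
    have := pvKey hbl str_.toList [] 0 (str_.toList.length + 1) hfree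
      (fun j hj => absurd hj (by omega)) (by omega)
    simpa using this
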